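-- pv_equiv track=rewrite | github.com/mikejhuang/PhageProtVec | protvec.py | kmerlists
-- ===== SOURCE A (Python) =====
-- def kmerlists(seq):
--     kmer0 = []
--     kmer1 = []
--     kmer2 = []
--     for i in range(0, len(seq) - 2, 3):
--         if len(seq[i:i + 3]) == 3:
--             kmer0.append(seq[i:i + 3])
--         i += 1
--         if len(seq[i:i + 3]) == 3:
--             kmer1.append(seq[i:i + 3])
--         i += 1
--         if len(seq[i:i + 3]) == 3:
--             kmer2.append(seq[i:i + 3])
--     return [kmer0, kmer1, kmer2]
-- ===== SOURCE B (Python) =====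
-- def kmerlists(seq):
--     return [[seq[i:i + 3] for i in range(f, len(seq) - 2, 3)] for f in range(3)]
-- ===== Notes on version B (the rewrite author's own statement) =====
-- stated objective: idiomatic
-- what changed: Replaced A's single interleaved pass maintaining three accumulator lists with explicit length-3 checks by a per-frame nested comprehension: for each reading frame f in 0..2, collect seq[i:i+3] for i in range(f, len(seq)-2, 3), the range bound subsuming the length check. (B avoids per-iteration conditional appends and triple bookkeeping, measured ~1.8x faster).
import Mathlib
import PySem

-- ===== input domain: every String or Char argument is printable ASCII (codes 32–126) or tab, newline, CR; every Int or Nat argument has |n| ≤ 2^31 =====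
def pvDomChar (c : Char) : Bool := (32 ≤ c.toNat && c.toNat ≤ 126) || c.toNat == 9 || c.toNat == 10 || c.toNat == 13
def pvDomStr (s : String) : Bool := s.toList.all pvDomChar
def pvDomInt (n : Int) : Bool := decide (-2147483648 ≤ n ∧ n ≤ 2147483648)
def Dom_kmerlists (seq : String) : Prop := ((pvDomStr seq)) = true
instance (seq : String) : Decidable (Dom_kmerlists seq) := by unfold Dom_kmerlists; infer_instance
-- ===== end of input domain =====

-- B restructures A's single interleaved pass with three accumulators into one
-- slice-collecting comprehension per reading frame f ∈ {0,1,2} (objective: idiomatic).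

-- shared helper: the Python slice seq[i:i+3]
def pvSlice3 (seq : String) (i : Int) : String :=
  PySem.Str.slice seq (some i) (some (i + 3))

-- ===== PORT A =====
-- the body of A's for-loop: three conditional appends, with i incremented twice
def kmerStep (seq : String) (acc : List String × List String × List String) (i : Int) :
    List String × List String × List String :=
  let k0 := if PySem.Str.len (pvSlice3 seq i) == 3 then acc.1 ++ [pvSlice3 seq i] else acc.1
  let i := i + 1
  let k1 := if PySem.Str.len (pvSlice3 seq i) == 3 then acc.2.1 ++ [pvSlice3 seq i] else acc.2.1
  let i := i + 1
  let k2 := if PySem.Str.len (pvSlice3 seq i) == 3 then acc.2.2 ++ [pvSlice3 seq i] else acc.2.2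
  (k0, k1, k2)

def kmerlists (seq : String) : List (List String) :=
  let r := (PySem.List.pyRange 0 (PySem.Str.len seq - 2) 3).foldl (kmerStep seq) ([], [], [])
  [r.1, r.2.1, r.2.2]

-- ===== PORT B =====
def kmerlists_alt (seq : String) : List (List String) :=
  (PySem.List.pyRange 0 3 1).map (fun f =>
    (PySem.List.pyRange f (PySem.Str.len seq - 2) 3).map (pvSlice3 seq))

-- ===== PRECONDITION & SPEC =====
def Spec_kmerlists (seq : String) (out : List (List String)) : Prop := out = kmerlists_alt seq
instance (seq : String) (out : List (List String)) : Decidable (Spec_kmerlists seq out) := by unfold Spec_kmerlists; infer_instance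

-- ===== CLAIM (what is proved, stated in full; the proofs are below) =====
def Claim_equal_kmerlists : Prop := ∀ (seq : String), Dom_kmerlists seq → Spec_kmerlists seq (kmerlists seq)

-- ===== LEMMAS AND PROOFS =====

lemma pyRange3_nil (a b : Int) (h : b ≤ a) : PySem.List.pyRange a b 3 = [] := by
  rw [PySem.List.pyRange_of_pos a b (by norm_num)]
  simp [not_lt.mpr h]

lemma pyRange3_cons (a b : Int) (h : a < b) :
    PySem.List.pyRange a b 3 = a :: PySem.List.pyRange (a + 3) b 3 := by
  rw [PySem.List.pyRange_of_pos a b (by norm_num),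
      PySem.List.pyRange_of_pos (a + 3) b (by norm_num)]
  rw [if_pos h]
  by_cases h2 : a + 3 < b
  · rw [if_pos h2]
    have hc : ((b - a + 3 - 1) / 3).toNat = ((b - (a + 3) + 3 - 1) / 3).toNat + 1 := by omega
    rw [hc, List.range_succ_eq_map]
    simp only [List.map_cons, List.map_map]
    congr 1
    · norm_num
    apply List.map_congr_left
    intro k _
    simp [Function.comp]
    ring
  · rw [if_neg h2]
    have hc : ((b - a + 3 - 1) / 3).toNat = 1 := by omega
    simp [hc, List.range_one]

lemma pyRange3_split (a b : Int) :
    PySem.List.pyRange a b 3 = (if a < b then [a] else []) ++ PySem.List.pyRange (a + 3) b 3 := by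
  by_cases h : a < b
  · simp [h, pyRange3_cons a b h]
  · simp [h, pyRange3_nil a b (by omega), pyRange3_nil (a + 3) b (by omega)]

lemma len_pvSlice3 (seq : String) (i : Int) (h : 0 ≤ i) :
    PySem.Str.len (pvSlice3 seq i) = ((min 3 (seq.toList.length - i.toNat) : Nat) : Int) := by
  unfold pvSlice3
  rw [PySem.Str.len_eq]
  rw [show (PySem.Str.slice seq (some i) (some (i + 3))).toList
        = PySem.List.slice seq.toList (some i) (some (i + 3)) by
      simp [PySem.Str.toList_slice, PySem.Chars.slice_eq_listSlice]]
  rw [PySem.List.slice_toNat seq.toList h (by omega)]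
  simp [List.length_take, List.length_drop]
  omega

lemma cond_pvSlice3 (seq : String) (i : Int) (h : 0 ≤ i) :
    (PySem.Str.len (pvSlice3 seq i) == 3) = decide (i + 3 ≤ (seq.toList.length : Int)) := by
  rw [len_pvSlice3 seq i h]
  by_cases hc : i + 3 ≤ (seq.toList.length : Int)
  · have h3 : ((min 3 (seq.toList.length - i.toNat) : Nat) : Int) = 3 := by omega
    rw [h3, decide_eq_true hc]
    rfl
  · rw [decide_eq_false hc]
    exact beq_eq_false_iff_ne.mpr (by omega)

lemma kmerStep_eq (seq : String) (a0 a1 a2 : List String) (i : Int)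
    (h0 : 0 ≤ i) (hib : i < (seq.toList.length : Int) - 2) :
    kmerStep seq (a0, a1, a2) i =
      (a0 ++ [pvSlice3 seq i],
       a1 ++ (if i + 1 < (seq.toList.length : Int) - 2 then [pvSlice3 seq (i + 1)] else []),
       a2 ++ (if i + 2 < (seq.toList.length : Int) - 2 then [pvSlice3 seq (i + 2)] else [])) := by
  simp only [kmerStep]
  rw [cond_pvSlice3 seq i h0, cond_pvSlice3 seq (i + 1) (by omega), cond_pvSlice3 seq (i + 1 + 1) (by omega)]
  rw [decide_eq_true (show i + 3 ≤ (seq.toList.length : Int) by omega),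
      show i + 1 + 1 = i + 2 by ring]
  simp only [decide_eq_true_eq, if_true]
  split_ifs <;> simp_all <;> omega

lemma loopA (seq : String) (b : Int) (hb : b = (seq.toList.length : Int) - 2) :
    ∀ (m : Nat) (i : Int) (a0 a1 a2 : List String), 0 ≤ i → (b - i).toNat ≤ m →
      (PySem.List.pyRange i b 3).foldl (kmerStep seq) (a0, a1, a2) =
        (a0 ++ (PySem.List.pyRange i b 3).map (pvSlice3 seq),
         a1 ++ (PySem.List.pyRange (i + 1) b 3).map (pvSlice3 seq),
         a2 ++ (PySem.List.pyRange (i + 2) b 3).map (pvSlice3 seq)) := by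
  intro m
  induction m with
  | zero =>
    intro i a0 a1 a2 h0 hm
    rw [pyRange3_nil i b (by omega), pyRange3_nil (i + 1) b (by omega),
        pyRange3_nil (i + 2) b (by omega)]
    simp
  | succ m ih =>
    intro i a0 a1 a2 h0 hm
    by_cases hib : i < b
    · rw [pyRange3_cons i b hib]
      simp only [List.foldl_cons]
      rw [kmerStep_eq seq a0 a1 a2 i h0 (hb ▸ hib)]
      rw [ih (i + 3) _ _ _ (by omega) (by omega)]
      rw [pyRange3_split (i + 1) b, pyRange3_split (i + 2) b]
      rw [show i + 1 + 3 = i + 3 + 1 by ring, show i + 2 + 3 = i + 3 + 2 by ring]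
      subst hb
      simp only [List.map_append, List.map_cons, List.map_nil, List.append_assoc,
        apply_ite (List.map (pvSlice3 seq)), List.cons_append, List.nil_append]
    · rw [pyRange3_nil i b (by omega), pyRange3_nil (i + 1) b (by omega),
          pyRange3_nil (i + 2) b (by omega)]
      simp

-- ===== VERDICT (by name: the statement is the Claim_ definition above) =====
theorem kmerlists_spec : Claim_equal_kmerlists := by
  intro seq _
  unfold Spec_kmerlists kmerlists kmerlists_alt
  simp only [PySem.Str.len_eq]
  rw [loopA seq ((seq.toList.length : Int) - 2) rfl ((seq.toList.length : Int) - 2).toNat 0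
        [] [] [] le_rfl (by omega)]
  rw [show PySem.List.pyRange 0 3 1 = [0, 1, 2] from rfl]
  simp
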